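-- pv_equiv track=rewrite | github.com/HJun0725/coding-practice | 프로그래머스/0/120863. 다항식 더하기/다항식 더하기.py | solution
-- ===== SOURCE A (Python) =====
-- def solution(polynomial):
--     p = polynomial.split()
--     v = []
--     n = []
--     for i in range(0,len(p),2):
--         if "x" in p[i]:
--             if p[i] == "x":
--                 v.append(1)
--             else:
--                 v.append(int(p[i].replace("x","")))
--         else:
--             n.append(int(p[i]))
--
--     if sum(v) == 1:
--         if n == []:
--             return "x"
--         else:
--             return f"x + {sum(n)}"
--     else:
--         if n == [] or v == []:
--             return [f"{sum(v)}x",f"{sum(n)}"][int(n != [])]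
--         else:
--             return f"{sum(v)}x + {sum(n)}"
-- ===== SOURCE B (Python) =====
-- def solution(polynomial):
--     terms = polynomial.split()[::2]
--
--     def measure(ts):
--         # divide-and-conquer reduction of the term list into
--         # (coef_sum, const_sum, has_x, has_const)
--         if len(ts) == 0:
--             return (0, 0, False, False)
--         if len(ts) == 1:
--             t = ts[0]
--             if "x" in t:
--                 return ((1 if t == "x" else int(t.replace("x", ""))), 0, True, False)
--             return (0, int(t), False, True)
--         mid = len(ts) // 2
--         c1, k1, x1, n1 = measure(ts[:mid])
--         c2, k2, x2, n2 = measure(ts[mid:])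
--         return (c1 + c2, k1 + k2, x1 or x2, n1 or n2)
--
--     coef, const, has_x, has_c = measure(terms)
--     parts = (["x" if coef == 1 else f"{coef}x"] if has_x else []) \
--             + ([str(const)] if has_c else [])
--     return " + ".join(parts) if parts else "0"
-- ===== Notes on version B (the rewrite author's own statement) =====
-- stated objective: alternative
-- what changed: B replaces A's sequential indexed loop that builds v/n lists and its four-way f-string/list-indexing return tree by a divide-and-conquer reduction: the term list is split recursively at its midpoint and the halves' (coef_sum, const_sum, has_x, has_const) summaries are merged, then the result is a ' + '.join of a data-driven parts list.
-- intended difference: On whitespace-only input (polynomial.split() == []) A returns the degenerate string '0x' (leftover of its list-indexing trick), while B returns '0', the sum of an empty polynomial, which is the intended value. — e.g. on solution(" "): A returns "0x", B returns "0"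
import Mathlib
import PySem

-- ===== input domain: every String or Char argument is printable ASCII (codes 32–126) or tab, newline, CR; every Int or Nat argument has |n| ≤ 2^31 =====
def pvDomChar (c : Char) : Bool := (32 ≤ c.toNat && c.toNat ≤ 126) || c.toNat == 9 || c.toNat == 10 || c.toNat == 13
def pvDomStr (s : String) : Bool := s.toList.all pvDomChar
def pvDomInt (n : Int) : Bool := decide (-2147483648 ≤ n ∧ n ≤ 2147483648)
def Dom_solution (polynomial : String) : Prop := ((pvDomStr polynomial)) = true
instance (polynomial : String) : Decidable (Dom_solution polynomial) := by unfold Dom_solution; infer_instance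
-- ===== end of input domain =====

-- B replaces A's sequential v/n list-building index loop and branchy return tree by a
-- divide-and-conquer midpoint reduction of the term list into (coef, const, has_x, has_const)
-- plus a ' + '.join of a parts list (objective: alternative); on whitespace-only input A
-- returns "0x" and B returns the intended "0" (see D_solution).


-- ===== PORT A =====
-- literal transliteration of A: index loop over range(0, len(p), 2) building the lists v and n,
-- then the four-way f-string / list-indexing return tree.  int(...) is ported as
-- (PySem.Int.ofStr? …).getD 0: Pre_solution excludes exactly the inputs where it is none (ValueError).
def solution (polynomial : String) : String :=
  let p := PySem.Str.split₀ polynomial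
  let vn : List Int × List Int :=
    (PySem.List.pyRange 0 (p.length : Int) 2).foldl
      (fun (acc : List Int × List Int) i =>
        let t := PySem.List.pyGetD p i ""
        if PySem.Str.isIn "x" t then
          if t = "x" then (acc.1 ++ [(1 : Int)], acc.2)
          else (acc.1 ++ [(PySem.Int.ofStr? (PySem.Str.replace t "x" "")).getD 0], acc.2)
        else (acc.1, acc.2 ++ [(PySem.Int.ofStr? t).getD 0]))
      ([], [])
  let v := vn.1
  let n := vn.2
  if v.sum = 1 then
    if n = [] then "x"
    else "x + " ++ PySem.Int.toStr n.sum
  else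
    if n = [] ∨ v = [] then
      PySem.List.pyGetD [PySem.Int.toStr v.sum ++ "x", PySem.Int.toStr n.sum]
        (if n ≠ [] then 1 else 0) ""
    else PySem.Int.toStr v.sum ++ "x + " ++ PySem.Int.toStr n.sum

-- ===== PORT B =====
-- literal transliteration of B's helper measure(ts): divide-and-conquer at mid = len(ts)//2.
-- ts[0] on a length-1 list is ts.headD ""; ts[:mid]/ts[mid:] with 0 ≤ mid ≤ len are
-- List.take/List.drop — exact on this domain.
def measureB (ts : List String) : Int × Int × Bool × Bool :=
  if ts.length = 0 then (0, 0, false, false)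
  else if ts.length = 1 then
    let t := ts.headD ""
    if PySem.Str.isIn "x" t then
      ((if t = "x" then (1 : Int)
        else (PySem.Int.ofStr? (PySem.Str.replace t "x" "")).getD 0), 0, true, false)
    else (0, (PySem.Int.ofStr? t).getD 0, false, true)
  else
    let mid := ts.length / 2
    let r1 := measureB (ts.take mid)
    let r2 := measureB (ts.drop mid)
    (r1.1 + r2.1, r1.2.1 + r2.2.1, r1.2.2.1 || r2.2.2.1, r1.2.2.2 || r2.2.2.2)
termination_by ts.length
decreasing_by
  · simp only [List.length_take]; omega
  · simp only [List.length_drop]; omega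

-- literal transliteration of B (Source B): terms = split()[::2], divide-and-conquer measure,
-- then a parts list joined with " + " ("0" when parts is empty).
def solution_alt (polynomial : String) : String :=
  let terms := (PySem.List.slice? (PySem.Str.split₀ polynomial) none none 2).getD []
  let st := measureB terms
  let parts : List String :=
    (if st.2.2.1 then [if st.1 = 1 then "x" else PySem.Int.toStr st.1 ++ "x"] else []) ++
    (if st.2.2.2 then [PySem.Int.toStr st.2.1] else [])
  if parts = [] then "0" else PySem.Str.join " + " parts

-- ===== PRECONDITION & SPEC =====
-- Pre_ excludes exactly the inputs on which Python A raises ValueError: an even-index token that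
-- is neither "x", nor (with "x" removed) an int(...)-parsable string, nor (without any "x") an
-- int(...)-parsable string.
def Pre_solution (polynomial : String) : Prop :=
  ∀ t ∈ (PySem.List.slice? (PySem.Str.split₀ polynomial) none none 2).getD [],
    if PySem.Str.isIn "x" t then
      t = "x" ∨ (PySem.Int.ofStr? (PySem.Str.replace t "x" "")).isSome = true
    else (PySem.Int.ofStr? t).isSome = true
instance (polynomial : String) : Decidable (Pre_solution polynomial) := by
  unfold Pre_solution; infer_instance

def pvWitness_solution : String := "3x + 7 + x"

-- On whitespace-only input (polynomial.split() == []) A returns the degenerate string "0x"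
-- (an artefact of its list-indexing trick), while B returns "0", the sum of an empty
-- polynomial, which is the intended value.
def D_solution (polynomial : String) : Prop := PySem.Str.split₀ polynomial = []
instance (polynomial : String) : Decidable (D_solution polynomial) := by
  unfold D_solution; infer_instance

def Spec_solution (polynomial : String) (out : String) : Prop :=
  ¬ D_solution polynomial → out = solution_alt polynomial
instance (polynomial : String) (out : String) : Decidable (Spec_solution polynomial out) := by
  unfold Spec_solution; infer_instance

def pvDiffWitness_solution : String := " "
def pvDiffWitnessOut_solution : String × String := ("0x", "0")

-- ===== CLAIM (what is proved, stated in full; the proofs are below) =====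
def Claim_unchanged_solution : Prop :=
  ∀ (polynomial : String), Dom_solution polynomial → Pre_solution polynomial →
    Spec_solution polynomial (solution polynomial)
def Claim_changed_solution : Prop :=
  Dom_solution (pvDiffWitness_solution) ∧ Pre_solution (pvDiffWitness_solution) ∧
  D_solution (pvDiffWitness_solution) ∧
  solution (pvDiffWitness_solution) = pvDiffWitnessOut_solution.1 ∧
  solution_alt (pvDiffWitness_solution) = pvDiffWitnessOut_solution.2 ∧
  pvDiffWitnessOut_solution.1 ≠ pvDiffWitnessOut_solution.2
def Claim_exact_solution : Prop :=
  ∀ (polynomial : String), Dom_solution polynomial → Pre_solution polynomial →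
    D_solution polynomial → solution polynomial ≠ solution_alt polynomial

-- ===== LEMMAS AND PROOFS =====

-- the even-index elements xs[::2], structurally
def evenIdx {α : Type} : List α → List α
  | [] => []
  | [a] => [a]
  | a :: _ :: r => a :: evenIdx r

def isXTok (t : String) : Bool := PySem.Str.isIn "x" t
def xval (t : String) : Int :=
  if t = "x" then 1 else (PySem.Int.ofStr? (PySem.Str.replace t "x" "")).getD 0
def nval (t : String) : Int := (PySem.Int.ofStr? t).getD 0

theorem evenIdx_eq_map_range {α : Type} (xs : List α) (d : α) :
    (List.range ((xs.length + 1) / 2)).map (fun k => xs.getD (2 * k) d) = evenIdx xs := by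
  induction xs using evenIdx.induct with
  | case1 => simp [evenIdx]
  | case2 a => simp [evenIdx]
  | case3 a b r ih =>
    have h2 : ((a :: b :: r).length + 1) / 2 = (r.length + 1) / 2 + 1 := by
      simp [List.length_cons]; omega
    rw [h2, List.range_succ_eq_map, List.map_cons, List.map_map]
    have hg : ∀ k : Nat, (a :: b :: r).getD (2 * Nat.succ k) d = r.getD (2 * k) d := by
      intro k
      have h3 : 2 * Nat.succ k = (2 * k) + 1 + 1 := by omega
      rw [h3, List.getD_cons_succ, List.getD_cons_succ]
    simp only [Function.comp_def, hg, Nat.mul_zero, List.getD_cons_zero, ih]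
    rfl

theorem evenIdx_eq_nil_iff {α : Type} (xs : List α) : evenIdx xs = [] ↔ xs = [] := by
  cases xs with
  | nil => simp [evenIdx]
  | cons a t => cases t <;> simp [evenIdx]

theorem rangeFold (xs : List String) {σ : Type} (f : σ → String → σ) (init : σ) :
    (PySem.List.pyRange 0 (xs.length : Int) 2).foldl
      (fun acc i => f acc (PySem.List.pyGetD xs i "")) init
    = (evenIdx xs).foldl f init := by
  rw [PySem.List.pyRange_of_pos 0 (xs.length : Int) (by norm_num), List.foldl_map]
  have hc : (if (0 : Int) < (xs.length : Int) then
      (((xs.length : Int) - 0 + 2 - 1) / 2).toNat else 0) = (xs.length + 1) / 2 := by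
    split_ifs with h <;> omega
  have hg : ∀ k : Nat, PySem.List.pyGetD xs ((0 : Int) + 2 * (k : Int)) "" = xs.getD (2 * k) "" := by
    intro k
    have h4 : (0 : Int) + 2 * (k : Int) = ((2 * k : Nat) : Int) := by push_cast; ring
    rw [h4, PySem.List.pyGetD_natCast]
  simp only [hc, hg]
  conv_rhs => rw [← evenIdx_eq_map_range xs "", List.foldl_map]

-- rangeFold specialised to A's loop body (beta-reduced form, as it appears in `solution`)
theorem rangeFoldA (xs : List String) (init : List Int × List Int) :
    (PySem.List.pyRange 0 (xs.length : Int) 2).foldl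
      (fun (acc : List Int × List Int) i =>
        if PySem.Str.isIn "x" (PySem.List.pyGetD xs i "") then
          if PySem.List.pyGetD xs i "" = "x" then (acc.1 ++ [(1 : Int)], acc.2)
          else (acc.1 ++
            [(PySem.Int.ofStr? (PySem.Str.replace (PySem.List.pyGetD xs i "") "x" "")).getD 0],
            acc.2)
        else (acc.1, acc.2 ++ [(PySem.Int.ofStr? (PySem.List.pyGetD xs i "")).getD 0])) init
    = (evenIdx xs).foldl
        (fun (acc : List Int × List Int) t =>
          if PySem.Str.isIn "x" t then
            if t = "x" then (acc.1 ++ [(1 : Int)], acc.2)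
            else (acc.1 ++ [(PySem.Int.ofStr? (PySem.Str.replace t "x" "")).getD 0], acc.2)
          else (acc.1, acc.2 ++ [(PySem.Int.ofStr? t).getD 0])) init :=
  rangeFold xs
    (fun (acc : List Int × List Int) t =>
      if PySem.Str.isIn "x" t then
        if t = "x" then (acc.1 ++ [(1 : Int)], acc.2)
        else (acc.1 ++ [(PySem.Int.ofStr? (PySem.Str.replace t "x" "")).getD 0], acc.2)
      else (acc.1, acc.2 ++ [(PySem.Int.ofStr? t).getD 0])) init

theorem sliceTwo (xs : List String) :
    (PySem.List.slice? xs none none 2).getD [] = evenIdx xs := by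
  simp only [PySem.List.slice?, PySem.List.sliceIndices]
  norm_num
  have hc : (if 0 < xs.length then (((xs.length : Int) + 2 - 1) / 2).toNat else 0)
      = (xs.length + 1) / 2 := by
    split_ifs with h <;> omega
  rw [hc]
  have hm : ∀ k ∈ List.range ((xs.length + 1) / 2),
      xs[((2 : Int) * (k : Int)).toNat]? = (some ∘ fun k => xs.getD (2 * k) "") k := by
    intro k hk
    rw [List.mem_range] at hk
    have hlt : 2 * k < xs.length := by omega
    have h4 : ((2 : Int) * (k : Int)).toNat = 2 * k := by omega
    simp [h4, List.getElem?_eq_getElem hlt, List.getD_eq_getElem?_getD]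
  rw [List.filterMap_congr hm, List.filterMap_eq_map, evenIdx_eq_map_range]

theorem foldA (ts : List String) (v n : List Int) :
    ts.foldl
      (fun (acc : List Int × List Int) t =>
        if PySem.Str.isIn "x" t then
          if t = "x" then (acc.1 ++ [(1 : Int)], acc.2)
          else (acc.1 ++ [(PySem.Int.ofStr? (PySem.Str.replace t "x" "")).getD 0], acc.2)
        else (acc.1, acc.2 ++ [(PySem.Int.ofStr? t).getD 0])) (v, n)
    = (v ++ (ts.filter isXTok).map xval,
       n ++ (ts.filter (fun t => !isXTok t)).map nval) := by
  induction ts generalizing v n with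
  | nil => simp
  | cons t ts ih =>
    rw [List.foldl_cons]
    cases hx : PySem.Str.isIn "x" t with
    | true =>
      have hx' : isXTok t = true := hx
      rw [if_pos rfl]
      by_cases ht : t = "x"
      · rw [if_pos ht, ih]
        simp [ht, xval, List.append_assoc,
          show isXTok "x" = true from by decide]
      · rw [if_neg ht, ih]
        simp [hx', ht, xval, List.append_assoc]
    | false =>
      have hx' : isXTok t = false := hx
      rw [if_neg Bool.false_ne_true, ih]
      simp [hx', nval, List.append_assoc]

-- the divide-and-conquer reduction computes exactly the sums and presence flags
theorem measureB_nil : measureB [] = (0, 0, false, false) := by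
  rw [measureB.eq_def]; rfl

theorem measureB_eq_aux (fuel : Nat) : ∀ ts : List String, ts.length ≤ fuel →
    measureB ts = (((ts.filter isXTok).map xval).sum,
                   ((ts.filter (fun t => !isXTok t)).map nval).sum,
                   ts.any isXTok,
                   ts.any (fun t => !isXTok t)) := by
  induction fuel with
  | zero =>
    intro ts h
    have h0 : ts = [] := by rw [← List.length_eq_zero_iff]; omega
    subst h0
    simp [measureB_nil]
  | succ m ih =>
    intro ts h
    rw [measureB.eq_def]
    by_cases h0 : ts.length = 0
    · rw [if_pos h0]
      have h0' : ts = [] := List.length_eq_zero_iff.mp h0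
      subst h0'
      simp
    · rw [if_neg h0]
      by_cases h1 : ts.length = 1
      · rw [if_pos h1]
        obtain ⟨t, rfl⟩ := List.length_eq_one_iff.mp h1
        simp only [List.headD_cons]
        cases hx : PySem.Str.isIn "x" t with
        | true =>
          have hx' : isXTok t = true := hx
          simp [hx', xval]
        | false =>
          have hx' : isXTok t = false := hx
          simp [hx', nval]
      · rw [if_neg h1]
        dsimp only
        have ht : (ts.take (ts.length / 2)).length ≤ m := by
          simp only [List.length_take]; omega
        have hd : (ts.drop (ts.length / 2)).length ≤ m := by
          simp only [List.length_drop]; omega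
        rw [ih _ ht, ih _ hd]
        simp only [Prod.mk.injEq]
        refine ⟨?_, ?_, ?_, ?_⟩
        · rw [← List.sum_append, ← List.map_append, ← List.filter_append, List.take_append_drop]
        · rw [← List.sum_append, ← List.map_append, ← List.filter_append, List.take_append_drop]
        · rw [← List.any_append, List.take_append_drop]
        · rw [← List.any_append, List.take_append_drop]

-- the divide-and-conquer reduction computes exactly the sums and presence flags
theorem measureB_eq (ts : List String) :
    measureB ts = (((ts.filter isXTok).map xval).sum,
                   ((ts.filter (fun t => !isXTok t)).map nval).sum,
                   ts.any isXTok,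
                   ts.any (fun t => !isXTok t)) :=
  measureB_eq_aux ts.length ts le_rfl

-- B returns "0" whenever the token list is empty
theorem alt_empty (polynomial : String) (h : PySem.Str.split₀ polynomial = []) :
    solution_alt polynomial = "0" := by
  simp [solution_alt, h, sliceTwo, evenIdx, measureB_nil]

theorem strJoinOne (s : String) : PySem.Str.join " + " [s] = s := by
  apply String.toList_inj.mp
  simp [PySem.Str.toList_join, PySem.Chars.join_singleton]

theorem strJoinTwo (a b : String) : PySem.Str.join " + " [a, b] = a ++ " + " ++ b := by
  apply String.toList_inj.mp
  simp [PySem.Str.toList_join, PySem.Chars.join_cons_cons, PySem.Chars.join_singleton,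
    String.toList_append]

theorem strXPlus (z : String) : "x + " ++ z = "x" ++ " + " ++ z := by
  apply String.toList_inj.mp
  simp only [String.toList_append]
  rw [show ("x + " : String).toList = "x".toList ++ " + ".toList from by decide]

theorem strCoefPlus (a z : String) : a ++ "x + " ++ z = a ++ "x" ++ " + " ++ z := by
  apply String.toList_inj.mp
  simp only [String.toList_append]
  rw [show ("x + " : String).toList = "x".toList ++ " + ".toList from by decide]
  simp [List.append_assoc]

theorem fmt_eq (v n : List Int) (hx hc : Bool)
    (hv : v = [] ↔ hx = false) (hn : n = [] ↔ hc = false) (hboth : ¬(v = [] ∧ n = [])) :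
    (if v.sum = 1 then
       if n = [] then "x" else "x + " ++ PySem.Int.toStr n.sum
     else if n = [] ∨ v = [] then
       PySem.List.pyGetD [PySem.Int.toStr v.sum ++ "x", PySem.Int.toStr n.sum]
         (if n ≠ [] then 1 else 0) ""
     else PySem.Int.toStr v.sum ++ "x + " ++ PySem.Int.toStr n.sum)
  = (if ((if hx then [if v.sum = 1 then "x" else PySem.Int.toStr v.sum ++ "x"] else []) ++
         (if hc then [PySem.Int.toStr n.sum] else [])) = [] then "0"
     else PySem.Str.join " + "
       ((if hx then [if v.sum = 1 then "x" else PySem.Int.toStr v.sum ++ "x"] else []) ++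
        (if hc then [PySem.Int.toStr n.sum] else []))) := by
  by_cases h1 : v.sum = 1
  · have hvne : v ≠ [] := by
      intro h; rw [h] at h1; simp at h1
    have hxT : hx = true := by
      cases hxv : hx
      · exact absurd (hv.mpr hxv) hvne
      · rfl
    by_cases h2 : n = []
    · have hcF : hc = false := hn.mp h2
      simp [h1, h2, hxT, hcF, strJoinOne]
    · have hcT : hc = true := by
        cases hcv : hc
        · exact absurd (hn.mpr hcv) h2
        · rfl
      simp [h1, h2, hxT, hcT, strJoinTwo, strXPlus]
  · by_cases h2 : n = []
    · have hvne : v ≠ [] := fun h => hboth ⟨h, h2⟩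
      have hxT : hx = true := by
        cases hxv : hx
        · exact absurd (hv.mpr hxv) hvne
        · rfl
      have hcF : hc = false := hn.mp h2
      simp [h1, h2, hxT, hcF, strJoinOne]
    · have hcT : hc = true := by
        cases hcv : hc
        · exact absurd (hn.mpr hcv) h2
        · rfl
      by_cases h3 : v = []
      · have hxF : hx = false := hv.mp h3
        have hget : PySem.List.pyGetD
            [PySem.Int.toStr v.sum ++ "x", PySem.Int.toStr n.sum] (1 : Int) ""
            = PySem.Int.toStr n.sum := rfl
        rw [if_neg h1, if_pos (Or.inr h3), if_pos h2, hget]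
        simp [hxF, hcT, strJoinOne]
      · have hxT : hx = true := by
          cases hxv : hx
          · exact absurd (hv.mpr hxv) h3
          · rfl
        simp [h1, h2, h3, hxT, hcT, strJoinTwo, strCoefPlus]

-- ===== VERDICT (by name: the statement is the Claim_ definition above) =====
theorem solution_spec : Claim_unchanged_solution := by
  intro polynomial _ _ hnd
  have hnd' : PySem.Str.split₀ polynomial ≠ [] := hnd
  show solution polynomial = solution_alt polynomial
  simp only [solution, solution_alt]
  rw [rangeFoldA, sliceTwo, foldA, measureB_eq]
  simp only [List.nil_append]
  set E := evenIdx (PySem.Str.split₀ polynomial) with hEdef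
  have hEne : E ≠ [] := by
    rw [hEdef, Ne, evenIdx_eq_nil_iff]; exact hnd'
  have hv : (E.filter isXTok).map xval = [] ↔ E.any isXTok = false := by
    rw [List.map_eq_nil_iff, List.filter_eq_nil_iff, List.any_eq_false]
  have hn : (E.filter (fun t => !isXTok t)).map nval = [] ↔
      E.any (fun t => !isXTok t) = false := by
    rw [List.map_eq_nil_iff, List.filter_eq_nil_iff, List.any_eq_false]
  have hboth : ¬((E.filter isXTok).map xval = [] ∧
      (E.filter (fun t => !isXTok t)).map nval = []) := by
    rintro ⟨h1, h2⟩
    rw [List.map_eq_nil_iff, List.filter_eq_nil_iff] at h1 h2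
    obtain ⟨a, ha⟩ := List.exists_mem_of_ne_nil E hEne
    have ha1 := h1 a ha
    have ha2 := h2 a ha
    simp at ha1 ha2
    rw [ha1] at ha2
    exact absurd ha2 (by simp)
  exact fmt_eq _ _ _ _ hv hn hboth

theorem solution_changed : Claim_changed_solution := by
  unfold Claim_changed_solution
  refine ⟨by decide, by decide, by decide, by decide, ?_, by decide⟩
  exact alt_empty _ (by decide)

theorem solution_tight : Claim_exact_solution := by
  intro polynomial _ _ hD
  have hD' : PySem.Str.split₀ polynomial = [] := hD
  have hA : solution polynomial = "0x" := by
    simp only [solution, hD']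
    rfl
  have hB : solution_alt polynomial = "0" := alt_empty polynomial hD'
  rw [hA, hB]
  decide
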